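-- pv_equiv track=rewrite | github.com/thin-edge/modbus-plugin | tedge_modbus/reader/mapper.py | buffer_register
-- ===== SOURCE A (Python) =====
-- def buffer_register(register: list, little_endian, is_little_word_endian):
--     """Buffer register"""
--     buf = 0x00
--
--     if is_little_word_endian:
--         for reg in reversed(register):
--             buf = (
--                 (buf << 16) | reg if not little_endian else (reg >> 8) | (reg << 8)
--             )
--     else:
--         for reg in register:
--             buf = (
--                 (buf << 16) | reg if not little_endian else (reg >> 8) | (reg << 8)
--             )
--
--     return buf
-- ===== SOURCE B (Python) =====
-- def buffer_register(register: list, little_endian, is_little_word_endian):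
--     """Buffer register"""
--     if little_endian:
--         # A's byte-swap overwrites buf on every lap, so only the last-visited
--         # register survives: take it directly instead of looping.
--         if not register:
--             return 0
--         word = register[0] if is_little_word_endian else register[-1]
--         return (word >> 8) | (word << 8)
--     # positional closed form: OR each word in at its final shift in one pass
--     words = register if is_little_word_endian else reversed(register)
--     buf = 0
--     for k, reg in enumerate(words):
--         buf |= reg << (16 * k)
--     return buf
-- ===== Notes on version B (the rewrite author's own statement) =====
-- stated objective: alternative
-- what changed: The shift-accumulate fold is replaced by a positional one-pass OR (each register shifted directly to its final 16-bit slot via enumerate), and the little-endian loop, whose byte-swap overwrites the accumulator every iteration, is replaced by a direct read and byte-swap of the single surviving register.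
import Mathlib
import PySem

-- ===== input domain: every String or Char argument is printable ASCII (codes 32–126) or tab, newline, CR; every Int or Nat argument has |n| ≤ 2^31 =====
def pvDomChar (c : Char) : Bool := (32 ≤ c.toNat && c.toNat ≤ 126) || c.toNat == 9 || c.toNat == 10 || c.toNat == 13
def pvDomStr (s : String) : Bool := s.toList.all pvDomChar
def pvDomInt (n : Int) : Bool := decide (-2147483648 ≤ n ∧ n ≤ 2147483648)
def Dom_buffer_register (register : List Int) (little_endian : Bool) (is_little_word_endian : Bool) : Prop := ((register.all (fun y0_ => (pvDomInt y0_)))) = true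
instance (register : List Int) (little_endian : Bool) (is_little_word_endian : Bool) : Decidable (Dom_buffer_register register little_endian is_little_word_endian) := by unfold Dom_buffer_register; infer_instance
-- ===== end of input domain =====

-- B replaces A's shift-accumulate loop by a positional one-pass OR (each word shifted
-- straight to its final position) and replaces the little-endian loop — whose byte-swap
-- overwrites the accumulator on every lap — by a direct read of the one surviving word
-- (objective: alternative decomposition; equivalence proved on all inputs).

-- ===== PORT A =====
def buffer_register (register : List Int) (little_endian : Bool) (is_little_word_endian : Bool) : Int :=
  -- buf = (buf << 16) | reg if not little_endian else (reg >> 8) | (reg << 8)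
  let step : Int → Int → Int := fun buf reg =>
    if little_endian = false then PySem.Int.bor (buf <<< (16 : Nat)) reg
    else PySem.Int.bor (reg >>> (8 : Nat)) (reg <<< (8 : Nat))
  if is_little_word_endian then
    register.reverse.foldl step 0     -- for reg in reversed(register)
  else
    register.foldl step 0             -- for reg in register

-- ===== PORT B =====
def buffer_register_alt (register : List Int) (little_endian : Bool) (is_little_word_endian : Bool) : Int :=
  if little_endian then
    if register.isEmpty then 0
    else
      -- word = register[0] if is_little_word_endian else register[-1]  (guarded non-empty)
      let word : Int := if is_little_word_endian then register.headD 0 else register.getLastD 0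
      PySem.Int.bor (word >>> (8 : Nat)) (word <<< (8 : Nat))
  else
    let words : List Int := if is_little_word_endian then register else register.reverse
    -- for k, reg in enumerate(words): buf |= reg << (16 * k)
    (PySem.List.enumerate words 0).foldl
      (fun buf kr => PySem.Int.bor buf (kr.2 <<< (16 * kr.1).toNat)) 0

-- ===== PRECONDITION & SPEC =====
def Spec_buffer_register (register : List Int) (little_endian : Bool) (is_little_word_endian : Bool) (out : Int) : Prop := out = buffer_register_alt register little_endian is_little_word_endian
instance (register : List Int) (little_endian : Bool) (is_little_word_endian : Bool) (out : Int) : Decidable (Spec_buffer_register register little_endian is_little_word_endian out) := by unfold Spec_buffer_register; infer_instance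

-- ===== CLAIM (what is proved, stated in full; the proofs are below) =====
def Claim_equal_buffer_register : Prop := ∀ (register : List Int) (little_endian : Bool) (is_little_word_endian : Bool), Dom_buffer_register register little_endian is_little_word_endian → Spec_buffer_register register little_endian is_little_word_endian (buffer_register register little_endian is_little_word_endian)

-- ===== LEMMAS AND PROOFS =====

/-- Two's-complement test bit of an integer (Python bit semantics). -/
def pvItb (a : Int) (k : Nat) : Bool :=
  if 0 ≤ a then a.toNat.testBit k else !((-a - 1).toNat.testBit k)

theorem pvItb_ext {a b : Int} (h : ∀ k, pvItb a k = pvItb b k) : a = b := by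
  by_cases ha : 0 ≤ a <;> by_cases hb : 0 ≤ b
  · have : a.toNat = b.toNat :=
      Nat.eq_of_testBit_eq (fun i => by
        have := h i; simp only [pvItb, if_pos ha, if_pos hb] at this; exact this)
    omega
  · exfalso
    set i := a.toNat + (-b - 1).toNat with hi
    have h1 : a.toNat < 2 ^ i := lt_of_le_of_lt (Nat.le_add_right _ _) (Nat.lt_two_pow_self)
    have h2 : (-b - 1).toNat < 2 ^ i := lt_of_le_of_lt (Nat.le_add_left _ _) (Nat.lt_two_pow_self)
    have hh := h i
    simp only [pvItb, if_pos ha, if_neg hb] at hh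
    rw [Nat.testBit_lt_two_pow h1, Nat.testBit_lt_two_pow h2] at hh
    simp at hh
  · exfalso
    set i := b.toNat + (-a - 1).toNat with hi
    have h1 : b.toNat < 2 ^ i := lt_of_le_of_lt (Nat.le_add_right _ _) (Nat.lt_two_pow_self)
    have h2 : (-a - 1).toNat < 2 ^ i := lt_of_le_of_lt (Nat.le_add_left _ _) (Nat.lt_two_pow_self)
    have hh := h i
    simp only [pvItb, if_neg ha, if_pos hb] at hh
    rw [Nat.testBit_lt_two_pow h1, Nat.testBit_lt_two_pow h2] at hh
    simp at hh
  · have : (-a - 1).toNat = (-b - 1).toNat :=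
      Nat.eq_of_testBit_eq (fun i => by
        have := h i; simp only [pvItb, if_neg ha, if_neg hb] at this
        cases hx : (-a - 1).toNat.testBit i <;> cases hy : (-b - 1).toNat.testBit i <;>
          simp_all)
    omega
theorem pvAdd_eq_or (x : Nat) : ∀ y : Nat, x &&& y = 0 → x + y = x ||| y := by
  induction x using Nat.binaryRec with
  | zero => intro y _; simp
  | bit b n ih =>
    intro y hxy
    induction y using Nat.bitCasesOn with
    | bit c m =>
      rw [Nat.land_bit, Nat.bit_eq_zero_iff] at hxy
      rcases hxy with ⟨h1, h2⟩
      rw [Nat.lor_bit, Nat.bit_val, Nat.bit_val, Nat.bit_val, ← ih m h1]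
      cases b <;> cases c <;> simp at h2 ⊢ <;> omega

theorem pvSub_and_eq_ldiff (y x : Nat) : y - (y &&& x) = y.ldiff x := by
  have hd : (y &&& x) &&& y.ldiff x = 0 := by
    apply Nat.eq_of_testBit_eq
    intro i
    simp only [Nat.testBit_land, Nat.testBit_ldiff, Nat.zero_testBit]
    cases y.testBit i <;> cases x.testBit i <;> rfl
  have hs : (y &&& x) + y.ldiff x = (y &&& x) ||| y.ldiff x := pvAdd_eq_or _ _ hd
  have ho : (y &&& x) ||| y.ldiff x = y := by
    apply Nat.eq_of_testBit_eq
    intro i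
    simp only [Nat.testBit_lor, Nat.testBit_land, Nat.testBit_ldiff]
    cases y.testBit i <;> cases x.testBit i <;> rfl
  omega

theorem pvItb_bor (a b : Int) (k : Nat) : pvItb (PySem.Int.bor a b) k = (pvItb a k || pvItb b k) := by
  unfold PySem.Int.bor
  by_cases ha : 0 ≤ a <;> by_cases hb : 0 ≤ b
  · rw [if_pos ha, if_pos hb]
    have h0 : (0:Int) ≤ ((a.toNat ||| b.toNat : Nat) : Int) := Int.natCast_nonneg _
    simp only [pvItb, if_pos h0, if_pos ha, if_pos hb, Int.toNat_natCast, Nat.testBit_lor]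
  · rw [if_pos ha, if_neg hb]
    set y := (-b - 1).toNat with hy
    set x := a.toNat with hx
    have hres : ¬ (0:Int) ≤ -((y - (y &&& x) : Nat) : Int) - 1 := by
      have : (0:Int) ≤ ((y - (y &&& x) : Nat) : Int) := Int.natCast_nonneg _
      omega
    have htn : (-(-((y - (y &&& x) : Nat) : Int) - 1) - 1).toNat = y - (y &&& x) := by omega
    simp only [pvItb, if_neg hres, htn, if_pos ha, if_neg hb]
    rw [pvSub_and_eq_ldiff, Nat.testBit_ldiff]
    cases hxx : x.testBit k <;> cases hyy : y.testBit k <;> rfl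
  · rw [if_neg ha, if_pos hb]
    set y := (-a - 1).toNat with hy
    set x := b.toNat with hx
    have hres : ¬ (0:Int) ≤ -((y - (y &&& x) : Nat) : Int) - 1 := by
      have : (0:Int) ≤ ((y - (y &&& x) : Nat) : Int) := Int.natCast_nonneg _
      omega
    have htn : (-(-((y - (y &&& x) : Nat) : Int) - 1) - 1).toNat = y - (y &&& x) := by omega
    simp only [pvItb, if_neg hres, htn, if_neg ha, if_pos hb]
    rw [pvSub_and_eq_ldiff, Nat.testBit_ldiff]
    cases hxx : x.testBit k <;> cases hyy : y.testBit k <;> rfl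
  · rw [if_neg ha, if_neg hb]
    set x := (-a - 1).toNat with hx
    set y := (-b - 1).toNat with hy
    have hres : ¬ (0:Int) ≤ -((x &&& y : Nat) : Int) - 1 := by
      have : (0:Int) ≤ ((x &&& y : Nat) : Int) := Int.natCast_nonneg _
      omega
    have htn : (-(-((x &&& y : Nat) : Int) - 1) - 1).toNat = x &&& y := by omega
    simp only [pvItb, if_neg hres, htn, if_neg ha, if_neg hb]
    rw [Nat.testBit_land]
    cases hxx : x.testBit k <;> cases hyy : y.testBit k <;> rfl

theorem pvItb_shift (a : Int) (n k : Nat) :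
    pvItb (a <<< n) k = (decide (n ≤ k) && pvItb a (k - n)) := by
  rw [Int.shiftLeft_eq]
  by_cases ha : 0 ≤ a
  · lift a to ℕ using ha with m
    have h0 : (0:Int) ≤ (m : Int) * 2 ^ n := by positivity
    have hcast : ((m : Int) * 2 ^ n) = ((m * 2 ^ n : Nat) : Int) := by push_cast; ring
    simp only [pvItb, hcast, Int.toNat_natCast, Nat.testBit_mul_two_pow]
    simp
  · have hm : a = -((-a - 1).toNat : Int) - 1 := by omega
    set m := (-a - 1).toNat with hmdef
    have hpow : (1:Int) ≤ 2 ^ n := one_le_pow₀ (by norm_num)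
    have hneg : ¬ (0:Int) ≤ a * 2 ^ n := by
      have : a ≤ -1 := by omega
      nlinarith
    have hkey : (-(a * 2 ^ n) - 1) = ((m * 2 ^ n + (2 ^ n - 1) : Nat) : Int) := by
      rw [hm]; push_cast [Nat.one_le_two_pow]; ring
    have htn : (-(a * 2 ^ n) - 1).toNat = m * 2 ^ n + (2 ^ n - 1) := by
      rw [hkey]; exact Int.toNat_natCast _
    have hdisj : (m * 2 ^ n) &&& (2 ^ n - 1) = 0 := by
      rw [Nat.and_two_pow_sub_one_eq_mod, Nat.mul_mod_left]
    have hsum : m * 2 ^ n + (2 ^ n - 1) = (m * 2 ^ n) ||| (2 ^ n - 1) := pvAdd_eq_or _ _ hdisj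
    simp only [pvItb, if_neg hneg, if_neg ha, htn, hsum, Nat.testBit_lor,
      Nat.testBit_mul_two_pow, Nat.testBit_two_pow_sub_one]
    rcases Nat.lt_or_ge k n with h | h
    · simp [h, Nat.not_le_of_lt h]
    · have hfix : (-a).toNat - 1 = m := by omega
      simp [h, Nat.not_lt_of_le h, hfix]

theorem pvBor_assoc (a b c : Int) :
    PySem.Int.bor (PySem.Int.bor a b) c = PySem.Int.bor a (PySem.Int.bor b c) := by
  apply pvItb_ext; intro k
  simp [pvItb_bor, Bool.or_assoc]

theorem pvBor_shift (a b : Int) (n : Nat) :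
    (PySem.Int.bor a b) <<< n = PySem.Int.bor (a <<< n) (b <<< n) := by
  apply pvItb_ext; intro k
  simp [pvItb_bor, pvItb_shift, Bool.and_or_distrib_left]

theorem pvShift_shift (a : Int) (m n : Nat) : (a <<< m) <<< n = a <<< (m + n) := by
  simp [Int.shiftLeft_eq, pow_add]; ring

theorem pvShift_zero (a : Int) : a <<< (0 : Nat) = a := by
  simp [Int.shiftLeft_eq]

theorem pvBor_zero_left (a : Int) : PySem.Int.bor 0 a = a := by
  rw [PySem.Int.bor_comm]; exact PySem.Int.bor_zero a

/-- A's big-endian accumulator over an appended element. -/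
theorem pvFA_append (l : List Int) (r : Int) :
    (l ++ [r]).foldl (fun buf reg => PySem.Int.bor (buf <<< (16 : Nat)) reg) 0
      = PySem.Int.bor ((l.foldl (fun buf reg => PySem.Int.bor (buf <<< (16 : Nat)) reg) 0) <<< (16 : Nat)) r := by
  rw [List.foldl_append]; rfl

/-- main invariant: B's positional OR over `enumerate l j` appends the bits of
`l.reverse` (folded A-style) shifted up by `16*j` to `init`. -/
theorem pvMain (l : List Int) : ∀ (j : Nat) (init : Int),
    (PySem.List.enumerate l (j : Int)).foldl
        (fun buf kr => PySem.Int.bor buf (kr.2 <<< (16 * kr.1).toNat)) init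
      = PySem.Int.bor init
          ((l.reverse.foldl (fun buf reg => PySem.Int.bor (buf <<< (16 : Nat)) reg) 0) <<< (16 * j)) := by
  induction l with
  | nil =>
    intro j init
    simp [PySem.List.enumerate_nil, PySem.Int.bor_zero]
  | cons a as ih =>
    intro j init
    rw [PySem.List.enumerate_cons, List.foldl_cons]
    have hj1 : ((j : Int) + 1) = ((j + 1 : Nat) : Int) := by push_cast; ring
    have htn : (16 * (j : Int)).toNat = 16 * j := by omega
    rw [hj1, ih (j + 1)]
    show PySem.Int.bor (PySem.Int.bor init (a <<< (16 * (j : Int)).toNat)) _ = _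
    rw [htn, List.reverse_cons, pvFA_append, pvBor_shift, pvShift_shift]
    rw [pvBor_assoc]
    congr 1
    rw [PySem.Int.bor_comm]
    congr 2
    omega

/-- a fold whose step ignores the accumulator keeps only the last element. -/
theorem pvFold_last (g : Int → Int) (l : List Int) : ∀ init : Int,
    l.foldl (fun _ reg => g reg) init = (l.getLast?).elim init g := by
  induction l with
  | nil => intro init; rfl
  | cons a as ih =>
    intro init
    rw [List.foldl_cons, ih (g a)]
    cases as with
    | nil => rfl
    | cons b bs =>
      cases hx : (b :: bs).getLast? with
      | none => simp [List.getLast?_eq_none_iff] at hx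
      | some x => simp [hx]

-- ===== VERDICT (by name: the statement is the Claim_ definition above) =====
theorem buffer_register_spec : Claim_equal_buffer_register := by
  intro register little_endian is_little_word_endian _
  unfold Spec_buffer_register buffer_register buffer_register_alt
  cases little_endian with
  | false =>
    simp only [Bool.false_eq_true, if_false, if_true]
    cases is_little_word_endian with
    | false =>
      simp only [Bool.false_eq_true, if_false]
      have := pvMain register.reverse 0 0
      simp only [Nat.cast_zero, Nat.mul_zero, pvShift_zero, pvBor_zero_left,
        List.reverse_reverse] at this
      rw [← this]
    | true =>
      simp only [if_true]
      have := pvMain register 0 0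
      simp only [Nat.cast_zero, Nat.mul_zero, pvShift_zero, pvBor_zero_left] at this
      rw [← this]
  | true =>
    simp only [if_true]
    cases is_little_word_endian with
    | false =>
      simp only [Bool.false_eq_true, if_false]
      show List.foldl (fun (_ reg : Int) => PySem.Int.bor (reg >>> (8 : Nat)) (reg <<< (8 : Nat))) 0 register
          = if register.isEmpty = true then 0
            else PySem.Int.bor ((register.getLastD 0) >>> (8 : Nat)) ((register.getLastD 0) <<< (8 : Nat))
      rw [pvFold_last (fun reg => PySem.Int.bor (reg >>> (8 : Nat)) (reg <<< (8 : Nat))) register 0]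
      cases register with
      | nil => rfl
      | cons a as =>
        cases hx : (a :: as).getLast? with
        | none => simp [List.getLast?_eq_none_iff] at hx
        | some x => simp [hx, List.getLastD_eq_getLast?]
    | true =>
      simp only [if_true]
      show List.foldl (fun (_ reg : Int) => PySem.Int.bor (reg >>> (8 : Nat)) (reg <<< (8 : Nat))) 0 register.reverse
          = if register.isEmpty = true then 0
            else PySem.Int.bor ((register.headD 0) >>> (8 : Nat)) ((register.headD 0) <<< (8 : Nat))
      rw [pvFold_last (fun reg => PySem.Int.bor (reg >>> (8 : Nat)) (reg <<< (8 : Nat))) register.reverse 0]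
      cases register with
      | nil => rfl
      | cons a as => simp [List.getLast?_reverse]
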